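-- pv_equiv track=rewrite | github.com/RawwBear/WDI | Zestaw_2/20.py | smallest_base
-- ===== SOURCE A (Python) =====
-- def change_bases(num, base):#works for systems from 2 to 9
--     result = ''
--     if base < 10:
--         while num != 0:
--             result += str(num%base)
--             num //= base
--     else:#we will omitt letters, but we lengths of two numbers in systems with base > 10 can be different
--         while num != 0:
--             if num%base > 9:
--                 num //= base
--             else:
--                 result += str(num % base)
--                 num //= base
--     return result[::-1]
--
-- def diff_digit_num(a, b):#checks that the digits in a numbers are all different
--     for i in range(len(a)):
--         for j in range(len(b)):
--             if a[i] == b[j]: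
--                 return False
--     return True
--
-- def smallest_base(a, b):
--     for i in range(2, 17):
--         if i == 10:
--             res_a = str(a)
--             res_b = str(b)
--         else:
--             res_a = change_bases(a, i)
--             res_b = change_bases(b, i)
--         if diff_digit_num(res_a, res_b) == True:
--             return i
--     return False
-- ===== SOURCE B (Python) =====
-- def has_digit(n, base, d):
--     # does the digit d (0 <= d <= 9) occur in n's base-`base` expansion?
--     # (digits > 9 can never equal d; 0 has an empty expansion)
--     while n:
--         if n % base == d:
--             return True
--         n //= base
--     return False
--
-- def clash(a, b, base):
--     # a and b share a digit iff one of the ten possible digit values occurs in both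
--     return any(has_digit(a, base, d) and has_digit(b, base, d) for d in range(10))
--
-- def smallest_base(a, b):
--     for base in range(2, 17):
--         if not clash(a, b, base):
--             return base
--     return False
-- ===== Notes on version B (the rewrite author's own statement) =====
-- stated objective: simpler
-- what changed: Instead of building string representations and comparing every character position of a against every position of b, B iterates over the ten possible digit values 0..9 and tests arithmetically whether the value occurs in both numbers' expansions; no representation is ever materialized and the base-10 str() special case disappears.
-- outside the precondition, e.g. on smallest_base(1, 1): A returns False, B returns False; on smallest_base(2, 2): A returns False, B returns False
import Mathlib
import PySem

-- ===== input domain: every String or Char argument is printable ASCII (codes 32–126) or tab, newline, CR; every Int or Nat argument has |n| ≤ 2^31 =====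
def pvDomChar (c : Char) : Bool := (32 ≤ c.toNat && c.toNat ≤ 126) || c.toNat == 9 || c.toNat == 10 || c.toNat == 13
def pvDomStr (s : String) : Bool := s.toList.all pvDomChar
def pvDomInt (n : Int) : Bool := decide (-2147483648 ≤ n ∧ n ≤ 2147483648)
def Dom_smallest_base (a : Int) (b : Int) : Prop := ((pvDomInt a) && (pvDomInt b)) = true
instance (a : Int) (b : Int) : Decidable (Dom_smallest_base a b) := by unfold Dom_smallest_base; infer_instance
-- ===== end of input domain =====

-- B never builds a representation: for each base it tests each of the ten possible digit
-- values 0..9 for occurrence in both numbers arithmetically (objective: simpler structure).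

-- ===== PORT A =====
-- change_bases, base < 10 branch: while num != 0: result += str(num % base); num //= base
-- (the num ≤ 0 / base ≤ 1 guard makes the recursion total; Python diverges there, outside Pre_)
def cbLoopLT (base num : Int) (result : List Char) : List Char :=
  if _h : num ≤ 0 ∨ base ≤ 1 then result
  else cbLoopLT base (PySem.Int.floordiv num base)
        (result ++ PySem.Int.toChars (PySem.Int.mod num base))
termination_by num.toNat
decreasing_by
  simp only [not_or, not_le] at _h
  obtain ⟨h1, h2⟩ := _h
  rw [PySem.Int.floordiv_eq_ediv_of_pos (by omega)]
  have h3 : num / base < num := by rw [Int.ediv_lt_iff_lt_mul (by omega)]; nlinarith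
  omega

-- change_bases, base ≥ 10 branch: digits > 9 are dropped
def cbLoopGE (base num : Int) (result : List Char) : List Char :=
  if _h : num ≤ 0 ∨ base ≤ 1 then result
  else if PySem.Int.mod num base > 9 then
    cbLoopGE base (PySem.Int.floordiv num base) result
  else
    cbLoopGE base (PySem.Int.floordiv num base)
      (result ++ PySem.Int.toChars (PySem.Int.mod num base))
termination_by num.toNat
decreasing_by
  all_goals
    simp only [not_or, not_le] at _h
    obtain ⟨h1, h2⟩ := _h
    rw [PySem.Int.floordiv_eq_ediv_of_pos (by omega)]
    have h3 : num / base < num := by rw [Int.ediv_lt_iff_lt_mul (by omega)]; nlinarith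
    omega

-- result[::-1] is List.reverse
def change_bases (num base : Int) : List Char :=
  (if base < 10 then cbLoopLT base num [] else cbLoopGE base num []).reverse

-- inner loop of diff_digit_num: for j in range(len(b)): if a[i] == b[j]: return False
def ddInner (s t : List Char) (i : Int) (js : List Int) : Bool :=
  match js with
  | [] => true
  | j :: js => if PySem.List.pyGetD s i ' ' = PySem.List.pyGetD t j ' ' then false
               else ddInner s t i js

-- outer loop: for i in range(len(a)): …; return True
def ddOuter (s t : List Char) (is : List Int) : Bool :=
  match is with
  | [] => true
  | i :: is => if ddInner s t i (PySem.List.pyRange 0 (PySem.List.len t) 1)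
               then ddOuter s t is else false

def diff_digit_num (s t : List Char) : Bool :=
  ddOuter s t (PySem.List.pyRange 0 (PySem.List.len s) 1)

-- for i in range(2, 17): …; return False  (Python's False is the int 0)
def sbLoop (a b : Int) (is : List Int) : Int :=
  match is with
  | [] => 0
  | i :: is =>
    let res_a := if i = 10 then PySem.Int.toChars a else change_bases a i
    let res_b := if i = 10 then PySem.Int.toChars b else change_bases b i
    if diff_digit_num res_a res_b = true then i else sbLoop a b is

def smallest_base (a : Int) (b : Int) : Int :=
  sbLoop a b (PySem.List.pyRange 2 17 1)

-- ===== PORT B =====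
-- while n: if n % base == d: return True; n //= base   (same totality guard as A's loops:
-- Python diverges on negative n, outside Pre_)
def has_digit (n base d : Int) : Bool :=
  if _h : n ≤ 0 ∨ base ≤ 1 then false
  else if PySem.Int.mod n base = d then true
  else has_digit (PySem.Int.floordiv n base) base d
termination_by n.toNat
decreasing_by
  simp only [not_or, not_le] at _h
  obtain ⟨h1, h2⟩ := _h
  rw [PySem.Int.floordiv_eq_ediv_of_pos (by omega)]
  have h3 : n / base < n := by rw [Int.ediv_lt_iff_lt_mul (by omega)]; nlinarith
  omega

-- any(has_digit(a, base, d) and has_digit(b, base, d) for d in range(10))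
def clash (a b base : Int) : Bool :=
  (PySem.List.pyRange 0 10 1).any (fun d => has_digit a base d && has_digit b base d)

-- for base in range(2, 17): if not clash(a, b, base): return base; …; return False
def sbAltLoop (a b : Int) (bases : List Int) : Int :=
  match bases with
  | [] => 0
  | base :: rest => if !clash a b base then base else sbAltLoop a b rest

def smallest_base_alt (a : Int) (b : Int) : Int :=
  sbAltLoop a b (PySem.List.pyRange 2 17 1)

-- ===== PRECONDITION & SPEC =====
-- the digits of n in base i that A's change_bases keeps (> 9 dropped; base 10 via str(n)),
-- stated independently of the ports through Mathlib's Nat.digits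
def pyKeptDigits (i : Nat) (n : Int) : List Nat :=
  if i = 10 then (if n = 0 then [0] else Nat.digits 10 n.toNat)
  else (Nat.digits i n.toNat).filter (· ≤ 9)

-- Pre_ excludes (a) negative inputs, on which change_bases' while loop never terminates
-- (num //= base stalls at -1) so the Python A never returns, and (b) inputs on which no
-- base in 2..16 separates the kept digit sets: there A returns the bool False, a value
-- outside the declared return type int (B returns False there too).
def Pre_smallest_base (a : Int) (b : Int) : Prop := 0 ≤ a ∧ 0 ≤ b ∧
  ∃ i ∈ Finset.Icc (2 : Nat) 16, ∀ d ∈ pyKeptDigits i a, d ∉ pyKeptDigits i b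
instance (a : Int) (b : Int) : Decidable (Pre_smallest_base a b) := by
  unfold Pre_smallest_base; infer_instance

def pvWitness_smallest_base : Int × Int := (3, 5)

def Spec_smallest_base (a : Int) (b : Int) (out : Int) : Prop := out = smallest_base_alt a b
instance (a : Int) (b : Int) (out : Int) : Decidable (Spec_smallest_base a b out) := by
  unfold Spec_smallest_base; infer_instance

-- ===== CLAIM (what is proved, stated in full; the proofs are below) =====
def Claim_equal_smallest_base : Prop := ∀ (a : Int) (b : Int), Dom_smallest_base a b →
  Pre_smallest_base a b → Spec_smallest_base a b (smallest_base a b)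

-- ===== LEMMAS AND PROOFS =====

-- the (≤ 9)-digits of n in the given base, least significant first (reference for both ports)
def digSpec (base n : Int) : List Int :=
  if _h : n ≤ 0 ∨ base ≤ 1 then []
  else (if PySem.Int.mod n base ≤ 9 then [PySem.Int.mod n base] else []) ++
       digSpec base (PySem.Int.floordiv n base)
termination_by n.toNat
decreasing_by
  simp only [not_or, not_le] at _h
  obtain ⟨h1, h2⟩ := _h
  rw [PySem.Int.floordiv_eq_ediv_of_pos (by omega)]
  have h3 : n / base < n := by rw [Int.ediv_lt_iff_lt_mul (by omega)]; nlinarith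
  omega

def digChar (d : Int) : Char := Char.ofNat (48 + d.toNat)

lemma floordiv_toNat_lt (num base : Int) (h1 : 0 < num) (h2 : 1 < base) :
    (PySem.Int.floordiv num base).toNat < num.toNat := by
  rw [PySem.Int.floordiv_eq_ediv_of_pos (by omega)]
  have h3 : num / base < num := by rw [Int.ediv_lt_iff_lt_mul (by omega)]; nlinarith
  omega

lemma digSpec_bounds (base : Int) (hb : 2 ≤ base) :
    ∀ fuel : Nat, ∀ n : Int, n.toNat ≤ fuel → ∀ x ∈ digSpec base n, 0 ≤ x ∧ x ≤ 9 := by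
  intro fuel
  induction fuel with
  | zero =>
    intro n hle x hx
    rw [digSpec, dif_pos (by omega)] at hx
    simp at hx
  | succ m ih =>
    intro n hle x hx
    rw [digSpec] at hx
    by_cases h0 : n ≤ 0 ∨ base ≤ 1
    · rw [dif_pos h0] at hx; simp at hx
    · rw [dif_neg h0] at hx
      simp only [not_or, not_le] at h0
      rcases List.mem_append.1 hx with hx1 | hx2
      · have hnn := PySem.Int.mod_nonneg (a := n) (b := base) (by omega)
        by_cases hm : PySem.Int.mod n base ≤ 9
        · rw [if_pos hm] at hx1; simp at hx1; omega
        · rw [if_neg hm] at hx1; simp at hx1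
      · exact ih _ (by have := floordiv_toNat_lt n base (by omega) (by omega); omega) x hx2

lemma toChars_digit (d : Int) (h0 : 0 ≤ d) (h9 : d ≤ 9) :
    PySem.Int.toChars d = [digChar d] := by
  interval_cases d <;> decide

lemma mem_cbLT (base : Int) (hb : 2 ≤ base) (hb' : base < 10) (c : Char) :
    ∀ fuel : Nat, ∀ num : Int, ∀ r : List Char, num.toNat ≤ fuel →
      (c ∈ cbLoopLT base num r ↔ c ∈ r ++ (digSpec base num).map digChar) := by
  intro fuel
  induction fuel with
  | zero =>
    intro num r hle
    rw [cbLoopLT, dif_pos (by omega), digSpec, dif_pos (by omega)]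
    simp
  | succ m ih =>
    intro num r hle
    rw [cbLoopLT, digSpec]
    by_cases h0 : num ≤ 0 ∨ base ≤ 1
    · rw [dif_pos h0, dif_pos h0]; simp
    · rw [dif_neg h0, dif_neg h0]
      simp only [not_or, not_le] at h0
      have hmlt := PySem.Int.mod_lt (a := num) (b := base) (by omega)
      have hmnn := PySem.Int.mod_nonneg (a := num) (b := base) (by omega)
      have hm9 : PySem.Int.mod num base ≤ 9 := by omega
      rw [if_pos hm9,
        ih (PySem.Int.floordiv num base) _
          (by have := floordiv_toNat_lt num base (by omega) (by omega); omega),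
        toChars_digit _ hmnn hm9]
      simp

lemma mem_cbGE (base : Int) (hb : 2 ≤ base) (c : Char) :
    ∀ fuel : Nat, ∀ num : Int, ∀ r : List Char, num.toNat ≤ fuel →
      (c ∈ cbLoopGE base num r ↔ c ∈ r ++ (digSpec base num).map digChar) := by
  intro fuel
  induction fuel with
  | zero =>
    intro num r hle
    rw [cbLoopGE, dif_pos (by omega), digSpec, dif_pos (by omega)]
    simp
  | succ m ih =>
    intro num r hle
    rw [cbLoopGE, digSpec]
    by_cases h0 : num ≤ 0 ∨ base ≤ 1
    · rw [dif_pos h0, dif_pos h0]; simp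
    · rw [dif_neg h0, dif_neg h0]
      simp only [not_or, not_le] at h0
      have hdec : (PySem.Int.floordiv num base).toNat ≤ m := by
        have := floordiv_toNat_lt num base (by omega) (by omega); omega
      have hmnn := PySem.Int.mod_nonneg (a := num) (b := base) (by omega)
      by_cases hm : PySem.Int.mod num base > 9
      · rw [if_pos hm, if_neg (by omega), ih (PySem.Int.floordiv num base) r hdec]
        simp
      · rw [if_neg hm, if_pos (by omega),
          ih (PySem.Int.floordiv num base) _ hdec,
          toChars_digit _ hmnn (by omega)]
        simp

lemma mem_change_bases (base n : Int) (hb : 2 ≤ base) (c : Char) :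
    c ∈ change_bases n base ↔ c ∈ (digSpec base n).map digChar := by
  unfold change_bases
  rw [List.mem_reverse]
  by_cases hL : base < 10
  · rw [if_pos hL, mem_cbLT base hb hL c n.toNat n [] le_rfl]; simp
  · rw [if_neg hL, mem_cbGE base hb c n.toNat n [] le_rfl]; simp

-- the decimal digits of a positive n are exactly digSpec at base 10 (no digit exceeds 9)
lemma digSpec_ten :
    ∀ fuel : Nat, ∀ n : Int, n.toNat ≤ fuel → 0 < n →
      digSpec 10 n = (Nat.digits 10 n.toNat).map Int.ofNat := by
  intro fuel
  induction fuel with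
  | zero => intro n hle hn; omega
  | succ f ih =>
    intro n hle hn
    rw [digSpec, dif_neg (by omega)]
    have hmod : PySem.Int.mod n 10 = ((n.toNat % 10 : Nat) : Int) := by
      rw [PySem.Int.mod_eq_emod_of_pos (by omega)]
      omega
    have hdiv : PySem.Int.floordiv n 10 = ((n.toNat / 10 : Nat) : Int) := by
      rw [PySem.Int.floordiv_eq_ediv_of_pos (by omega)]
      omega
    have hm9 : PySem.Int.mod n 10 ≤ 9 := by
      have := PySem.Int.mod_lt (a := n) (b := 10) (by omega)
      omega
    rw [if_pos hm9, Nat.digits_def' (by omega : 1 < 10) (by omega : 0 < n.toNat), hdiv, hmod]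
    by_cases hq : n.toNat / 10 = 0
    · rw [hq]
      rw [show digSpec 10 ((0 : Nat) : Int) = [] by rw [digSpec, dif_pos (by omega)]]
      simp
    · rw [ih ((n.toNat / 10 : Nat) : Int)
        (by have := Nat.div_lt_self (by omega : 0 < n.toNat) (by omega : 1 < 10); simp; omega)
        (by omega), Int.toNat_natCast]
      simp [Int.ofNat_eq_natCast]

-- character content of Nat.toDigitsCore, by fuel
lemma mem_toDigitsCore (c : Char) :
    ∀ fuel n : Nat, ∀ ds : List Char, n < fuel →
      (c ∈ Nat.toDigitsCore 10 fuel n ds ↔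
        c ∈ ds ∨ c ∈ (if n = 0 then [(0 : Nat)] else Nat.digits 10 n).map Nat.digitChar) := by
  intro fuel
  induction fuel with
  | zero => intro n ds h; omega
  | succ f ih =>
    intro n ds h
    rw [Nat.toDigitsCore]
    by_cases hq : n / 10 = 0
    · rw [if_pos hq]
      by_cases hn : n = 0
      · subst hn; simp; tauto
      · rw [if_neg hn, Nat.digits_def' (by omega : 1 < 10) (by omega : 0 < n), hq]
        simp [or_comm]
    · rw [if_neg hq,
        ih (n / 10) _ (by have : n / 10 < n := Nat.div_lt_self (by omega) (by omega); omega),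
        if_neg hq, if_neg (by omega : ¬ n = 0),
        Nat.digits_def' (by omega : 1 < 10) (by omega : 0 < n)]
      simp only [List.mem_cons, List.map_cons]
      tauto

lemma digitChar_eq_digChar (m : Nat) (h : m < 10) :
    Nat.digitChar m = digChar (m : Int) := by
  interval_cases m <;> decide

lemma mem_toChars_pos (n : Int) (hn : 0 < n) (c : Char) :
    c ∈ PySem.Int.toChars n ↔ c ∈ (digSpec 10 n).map digChar := by
  have h10 : ∀ m ∈ Nat.digits 10 n.toNat, m < 10 :=
    fun m hm => Nat.digits_lt_base (by omega) hm
  have hmaps : (Nat.digits 10 n.toNat).map Nat.digitChar =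
      ((Nat.digits 10 n.toNat).map Int.ofNat).map digChar := by
    rw [List.map_map]
    exact List.map_congr_left (fun m hm => digitChar_eq_digChar m (h10 m hm))
  rw [show PySem.Int.toChars n = Nat.toDigits 10 n.toNat by
        simp [PySem.Int.toChars, not_lt.2 (le_of_lt hn)],
    Nat.toDigits,
    mem_toDigitsCore c (n.toNat + 1) n.toNat [] (by omega),
    if_neg (by omega : ¬ n.toNat = 0),
    digSpec_ten n.toNat n le_rfl hn, ← hmaps]
  simp

-- B's membership test is membership in digSpec
lemma has_digit_iff (base d : Int) (hb : 2 ≤ base) (hd9 : d ≤ 9) :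
    ∀ fuel : Nat, ∀ n : Int, n.toNat ≤ fuel →
      (has_digit n base d = true ↔ d ∈ digSpec base n) := by
  intro fuel
  induction fuel with
  | zero =>
    intro n hle
    rw [has_digit, dif_pos (by omega), digSpec, dif_pos (by omega)]
    simp
  | succ m ih =>
    intro n hle
    rw [has_digit, digSpec]
    by_cases h0 : n ≤ 0 ∨ base ≤ 1
    · rw [dif_pos h0, dif_pos h0]; simp
    · rw [dif_neg h0, dif_neg h0]
      simp only [not_or, not_le] at h0
      have hrec := ih (PySem.Int.floordiv n base)
        (by have := floordiv_toNat_lt n base (by omega) (by omega); omega)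
      by_cases hm : PySem.Int.mod n base = d
      · rw [if_pos hm, if_pos (by omega), hm]
        simp
      · rw [if_neg hm, hrec]
        by_cases hk : PySem.Int.mod n base ≤ 9
        · rw [if_pos hk]
          simp only [List.singleton_append, List.mem_cons]
          constructor
          · exact Or.inr
          · rintro (h | h)
            · exact absurd h.symm hm
            · exact h
        · rw [if_neg hk]
          simp

-- ... and the clash test is non-disjointness of the digSpec digit sets
lemma clash_false_iff (a b base : Int) (hb : 2 ≤ base) :
    clash a b base = false ↔ ∀ x ∈ digSpec base a, x ∉ digSpec base b := by
  unfold clash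
  rw [List.any_eq_false]
  constructor
  · intro h x hxa hxb
    have hx09 := digSpec_bounds base hb a.toNat a le_rfl x hxa
    have hmem : x ∈ PySem.List.pyRange 0 10 1 := by
      rw [PySem.List.mem_pyRange_one]; omega
    have := h x hmem
    rw [Bool.and_eq_true,
      has_digit_iff base x hb (by omega) a.toNat a le_rfl,
      has_digit_iff base x hb (by omega) b.toNat b le_rfl] at this
    exact this ⟨hxa, hxb⟩
  · intro h d hd
    rw [PySem.List.mem_pyRange_one] at hd
    rw [Bool.and_eq_true,
      has_digit_iff base d hb (by omega) a.toNat a le_rfl,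
      has_digit_iff base d hb (by omega) b.toNat b le_rfl]
    rintro ⟨hda, hdb⟩
    exact h d hda hdb

lemma ddInner_true_iff (s t : List Char) (i : Int) (js : List Int) :
    ddInner s t i js = true ↔
      ∀ j ∈ js, PySem.List.pyGetD s i ' ' ≠ PySem.List.pyGetD t j ' ' := by
  induction js with
  | nil => simp [ddInner]
  | cons j js ih =>
    rw [ddInner]
    by_cases h : PySem.List.pyGetD s i ' ' = PySem.List.pyGetD t j ' '
    · simp [h]
    · simp [h, ih]

lemma ddOuter_true_iff (s t : List Char) (is : List Int) :
    ddOuter s t is = true ↔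
      ∀ i ∈ is, ddInner s t i (PySem.List.pyRange 0 (PySem.List.len t) 1) = true := by
  induction is with
  | nil => simp [ddOuter]
  | cons i is ih =>
    rw [ddOuter]
    simp only [PySem.List.len_eq] at ih ⊢
    by_cases h : ddInner s t i (PySem.List.pyRange 0 (t.length : Int) 1) = true
    · simp [h, ih]
    · simp [h]

lemma diff_true_iff (s t : List Char) :
    diff_digit_num s t = true ↔ ∀ x ∈ s, x ∉ t := by
  unfold diff_digit_num
  rw [ddOuter_true_iff]
  simp only [ddInner_true_iff, PySem.List.len_eq]
  constructor
  · intro h x hx hxt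
    obtain ⟨ix, hix, rfl⟩ := List.mem_iff_getElem.1 hx
    obtain ⟨jx, hjx, hEq⟩ := List.mem_iff_getElem.1 hxt
    refine absurd ?_ (h (ix : Int) ?_ (jx : Int) ?_)
    · simp only [PySem.List.pyGetD_natCast]
      rw [List.getD_eq_getElem s ' ' hix, List.getD_eq_getElem t ' ' hjx, hEq]
    · rw [PySem.List.mem_pyRange_one]; omega
    · rw [PySem.List.mem_pyRange_one]; omega
  · intro h i hi j hj hEq
    rw [PySem.List.mem_pyRange_one] at hi hj
    have hxs : PySem.List.pyGetD s i ' ' ∈ s :=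
      PySem.List.pyGetD_mem s ' ' (by unfold PySem.Raise.InRange; omega)
    have hxt : PySem.List.pyGetD t j ' ' ∈ t :=
      PySem.List.pyGetD_mem t ' ' (by unfold PySem.Raise.InRange; omega)
    rw [hEq] at hxs
    exact h _ hxs hxt

lemma disjoint_map_iff {α β : Type} (f : α → β) (A B : List α)
    (hf : ∀ x ∈ A, ∀ y ∈ B, f x = f y → x = y) :
    (∀ u ∈ A.map f, u ∉ B.map f) ↔ ∀ x ∈ A, x ∉ B := by
  constructor
  · intro h x hx hxB
    exact h (f x) (List.mem_map_of_mem hx) (List.mem_map_of_mem hxB)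
  · intro h u hu huB
    obtain ⟨x, hx, rfl⟩ := List.mem_map.1 hu
    obtain ⟨y, hy, hEq⟩ := List.mem_map.1 huB
    have hxy : x = y := hf x hx y hy hEq.symm
    exact h x hx (hxy ▸ hy)

lemma forall_not_mem_congr {α : Type} {L1 M1 L2 M2 : List α}
    (h1 : ∀ x, x ∈ L1 ↔ x ∈ M1) (h2 : ∀ x, x ∈ L2 ↔ x ∈ M2) :
    (∀ x ∈ L1, x ∉ L2) ↔ ∀ x ∈ M1, x ∉ M2 := by
  constructor
  · intro h x hx hx2; exact h x ((h1 x).2 hx) ((h2 x).2 hx2)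
  · intro h x hx hx2; exact h x ((h1 x).1 hx) ((h2 x).1 hx2)

lemma digChar_inj (d e : Int) (hd0 : 0 ≤ d) (hd9 : d ≤ 9) (he0 : 0 ≤ e) (he9 : e ≤ 9)
    (h : digChar d = digChar e) : d = e := by
  interval_cases d <;> interval_cases e <;> revert h <;> decide

lemma bool_eq_of_true_iff (x y : Bool) (h : (x = true) ↔ (y = true)) : x = y := by
  revert h; revert x y; decide

-- per-base: A's string comparison equals B's digit-universe test (positive inputs)
lemma cond_eq (a b i : Int) (ha : 0 < a) (hb : 0 < b) (h2 : 2 ≤ i) :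
    diff_digit_num (if i = 10 then PySem.Int.toChars a else change_bases a i)
        (if i = 10 then PySem.Int.toChars b else change_bases b i) =
      !clash a b i := by
  apply bool_eq_of_true_iff
  rw [diff_true_iff, Bool.not_eq_eq_eq_not, Bool.not_true, clash_false_iff a b i h2]
  have hdig : (∀ u ∈ (digSpec i a).map digChar, u ∉ (digSpec i b).map digChar) ↔
      ∀ x ∈ digSpec i a, x ∉ digSpec i b :=
    disjoint_map_iff digChar _ _ (fun x hx y hy hEq =>
      digChar_inj x y (digSpec_bounds i h2 a.toNat a le_rfl x hx).1
        (digSpec_bounds i h2 a.toNat a le_rfl x hx).2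
        (digSpec_bounds i h2 b.toNat b le_rfl y hy).1
        (digSpec_bounds i h2 b.toNat b le_rfl y hy).2 hEq)
  by_cases h10 : i = 10
  · subst h10
    rw [if_pos rfl, if_pos rfl,
      forall_not_mem_congr (mem_toChars_pos a ha) (mem_toChars_pos b hb)]
    exact hdig
  · simp only [if_neg h10]
    rw [forall_not_mem_congr (mem_change_bases i a h2) (mem_change_bases i b h2)]
    exact hdig

lemma loops_eq (a b : Int) (ha : 0 < a) (hb : 0 < b) :
    ∀ is : List Int, (∀ i ∈ is, 2 ≤ i) → sbLoop a b is = sbAltLoop a b is := by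
  intro is
  induction is with
  | nil => intro _; rfl
  | cons i is ih =>
    intro h
    rw [sbLoop, sbAltLoop]
    rw [cond_eq a b i ha hb (h i List.mem_cons_self),
      ih (fun j hj => h j (List.mem_cons_of_mem i hj))]

-- when a = 0 (or b = 0), base 2 already separates: both loops return 2 immediately
lemma diff_nil_left (t : List Char) : diff_digit_num [] t = true := by
  unfold diff_digit_num
  simp [PySem.List.len_eq, PySem.List.pyRange, ddOuter]

lemma ddInner_nil_right (s : List Char) (i : Int) :
    ddInner s ([] : List Char) i (PySem.List.pyRange 0 (PySem.List.len ([] : List Char)) 1) = true := by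
  simp [PySem.List.len_eq, PySem.List.pyRange, ddInner]

lemma diff_nil_right (s : List Char) : diff_digit_num s [] = true := by
  unfold diff_digit_num
  generalize PySem.List.pyRange 0 (PySem.List.len s) 1 = is
  induction is with
  | nil => rfl
  | cons i is ih => rw [ddOuter, if_pos (ddInner_nil_right s i), ih]

lemma change_bases_zero (base : Int) : change_bases 0 base = [] := by
  unfold change_bases
  by_cases h : base < 10
  · rw [if_pos h, cbLoopLT, dif_pos (Or.inl le_rfl)]; rfl
  · rw [if_neg h, cbLoopGE, dif_pos (Or.inl le_rfl)]; rfl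

lemma has_digit_zero (base d : Int) : has_digit 0 base d = false := by
  rw [has_digit, dif_pos (Or.inl le_rfl)]

lemma clash_zero (a b base : Int) (h : a = 0 ∨ b = 0) : clash a b base = false := by
  unfold clash
  rw [List.any_eq_false]
  intro d _
  rcases h with h | h <;> subst h <;> simp [has_digit_zero]

lemma zero_case (a b : Int) (h : a = 0 ∨ b = 0) :
    smallest_base a b = 2 ∧ smallest_base_alt a b = 2 := by
  constructor
  · unfold smallest_base
    rw [PySem.List.pyRange_one_cons (by omega), sbLoop]
    have hdiff : diff_digit_num
        (if (2 : Int) = 10 then PySem.Int.toChars a else change_bases a 2)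
        (if (2 : Int) = 10 then PySem.Int.toChars b else change_bases b 2) = true := by
      simp only [if_neg (by omega : ¬ (2 : Int) = 10)]
      rcases h with h | h <;> subst h
      · rw [change_bases_zero]; exact diff_nil_left _
      · rw [change_bases_zero]; exact diff_nil_right _
    rw [if_pos hdiff]
  · unfold smallest_base_alt
    rw [PySem.List.pyRange_one_cons (by omega), sbAltLoop, clash_zero a b 2 h]
    rfl

-- ===== VERDICT (by name: the statement is the Claim_ definition above) =====
theorem smallest_base_spec : Claim_equal_smallest_base := by
  intro a b _hdom hpre
  obtain ⟨ha, hb, -⟩ := hpre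
  unfold Spec_smallest_base
  by_cases h0 : a = 0 ∨ b = 0
  · obtain ⟨h1, h2⟩ := zero_case a b h0
    rw [h1, h2]
  · simp only [not_or] at h0
    unfold smallest_base smallest_base_alt
    exact loops_eq a b (by omega) (by omega) _
      (fun i hi => ((PySem.List.mem_pyRange_one).1 hi).1)
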